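-- pv_equiv track=rewrite | github.com/mauriciopl/AKImhof_heme | SeqD-HBM/SeqD-HBM_Linux_Win.py | CheckNetCharge
-- ===== SOURCE A (Python) =====
-- def CheckNetCharge(ninemer_sequence):
--     basic_aa_list = ['R', 'K', 'H'] # List of basic and positively charged amino acids
--     neg_aa_list = ['D','E'] # List of negatively charged amino acids
--     net_charge = 0
--     for i in range(len(ninemer_sequence)):
--         if(ninemer_sequence[i] in basic_aa_list):
--             net_charge += 1
--         if(ninemer_sequence[i] in neg_aa_list):
--             net_charge -= 1
--     return(net_charge)
-- ===== SOURCE B (Python) =====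
-- def CheckNetCharge(ninemer_sequence):
--     # Staged fixed passes: one str.count per charged residue, no per-character loop.
--     return (ninemer_sequence.count('R')
--             + ninemer_sequence.count('K')
--             + ninemer_sequence.count('H')
--             - ninemer_sequence.count('D')
--             - ninemer_sequence.count('E'))
-- ===== Notes on version B (the rewrite author's own statement) =====
-- stated objective: idiomatic
-- what changed: Replaces the per-character branching loop with five staged str.count passes (one per charged residue) combined arithmetically; B never iterates the sequence in Python code at all.
import Mathlib
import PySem

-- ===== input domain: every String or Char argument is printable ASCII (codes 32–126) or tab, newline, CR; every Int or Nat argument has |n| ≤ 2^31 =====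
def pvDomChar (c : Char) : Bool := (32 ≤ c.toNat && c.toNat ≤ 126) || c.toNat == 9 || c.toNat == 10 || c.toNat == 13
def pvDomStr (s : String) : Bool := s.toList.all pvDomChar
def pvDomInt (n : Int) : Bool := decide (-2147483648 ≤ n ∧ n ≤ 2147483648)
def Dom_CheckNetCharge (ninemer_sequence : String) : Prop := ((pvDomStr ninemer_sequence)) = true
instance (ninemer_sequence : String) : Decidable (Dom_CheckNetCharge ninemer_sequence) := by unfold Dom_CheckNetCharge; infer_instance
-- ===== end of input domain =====

-- ===== PORT A =====
def CheckNetCharge (ninemer_sequence : String) : Int :=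
  let basic_aa_list : List Char := ['R', 'K', 'H']
  let neg_aa_list : List Char := ['D', 'E']
  (PySem.List.pyRange 0 (ninemer_sequence.toList.length : Int) 1).foldl
    (fun net_charge i =>
      let net_charge :=
        if PySem.List.pyGetD ninemer_sequence.toList i ' ' ∈ basic_aa_list then net_charge + 1
        else net_charge
      if PySem.List.pyGetD ninemer_sequence.toList i ' ' ∈ neg_aa_list then net_charge - 1
      else net_charge)
    0

-- ===== PORT B =====
-- B: five staged str.count passes, one per charged residue; no per-character loop in B's own code.
def CheckNetCharge_alt (ninemer_sequence : String) : Int :=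
  (PySem.Str.count ninemer_sequence "R" : Int)
    + (PySem.Str.count ninemer_sequence "K" : Int)
    + (PySem.Str.count ninemer_sequence "H" : Int)
    - (PySem.Str.count ninemer_sequence "D" : Int)
    - (PySem.Str.count ninemer_sequence "E" : Int)

-- ===== PRECONDITION & SPEC =====
def Spec_CheckNetCharge (ninemer_sequence : String) (out : Int) : Prop := out = CheckNetCharge_alt ninemer_sequence
instance (ninemer_sequence : String) (out : Int) : Decidable (Spec_CheckNetCharge ninemer_sequence out) := by unfold Spec_CheckNetCharge; infer_instance

-- ===== CLAIM =====
def Claim_equal_CheckNetCharge : Prop := ∀ (ninemer_sequence : String), Dom_CheckNetCharge ninemer_sequence → Spec_CheckNetCharge ninemer_sequence (CheckNetCharge ninemer_sequence)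

-- ===== LEMMAS AND PROOFS =====

-- str.count with a single-character needle counts exactly the occurrences of that character.
lemma countGo_single (c : Char) : ∀ (l : List Char) (fuel acc : ℕ), l.length ≤ fuel →
    PySem.Chars.count.go [c] fuel l acc = acc + l.count c := by
  intro l
  induction l with
  | nil => intro fuel acc h; cases fuel <;> simp [PySem.Chars.count.go]
  | cons x t ih =>
    intro fuel acc h
    cases fuel with
    | zero => simp at h
    | succ n =>
      simp only [PySem.Chars.count.go]
      by_cases hx : x = c
      · subst hx
        simp only [List.isPrefixOf, beq_self_eq_true, Bool.true_and, if_pos,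
          List.length_singleton, List.drop_one, List.tail_cons]
        rw [ih n (acc + 1) (by simpa using h)]
        simp
        omega
      · simp only [List.isPrefixOf, Bool.and_true]
        rw [if_neg (by simp [Ne.symm hx]), ih n acc (by simpa using h)]
        simp [hx]

lemma count_single (s : String) (c : Char) (sub : String) (h : sub.toList = [c]) :
    PySem.Str.count s sub = s.toList.count c := by
  simp only [PySem.Str.count, PySem.Chars.count, h]
  rw [if_neg (by simp), countGo_single c s.toList s.toList.length 0 le_rfl]
  simp

-- A's counting loop equals the five character counts combined.
lemma stepFoldl_eq (l : List Char) (acc : Int) :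
    l.foldl
      (fun net_charge c =>
        let net_charge := if c ∈ (['R', 'K', 'H'] : List Char) then net_charge + 1 else net_charge
        if c ∈ (['D', 'E'] : List Char) then net_charge - 1 else net_charge)
      acc
    = acc + ((l.count 'R' : Int) + l.count 'K' + l.count 'H'
        - l.count 'D' - l.count 'E') := by
  induction l generalizing acc with
  | nil => simp
  | cons c l ih =>
    simp only [List.foldl_cons, ih, List.count_cons]
    push_cast
    simp only [List.mem_cons, List.not_mem_nil, or_false]
    clear ih
    split_ifs <;> simp_all <;> omega

-- ===== VERDICT =====
theorem CheckNetCharge_spec : Claim_equal_CheckNetCharge := by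
  intro s _
  unfold Spec_CheckNetCharge CheckNetCharge CheckNetCharge_alt
  simp only []
  rw [PySem.List.foldl_pyRange_zero_pyGetD' s.toList ' '
    (fun net_charge c =>
      let net_charge := if c ∈ (['R', 'K', 'H'] : List Char) then net_charge + 1 else net_charge
      if c ∈ (['D', 'E'] : List Char) then net_charge - 1 else net_charge) 0]
  rw [stepFoldl_eq]
  rw [count_single s 'R' "R" rfl, count_single s 'K' "K" rfl,
    count_single s 'H' "H" rfl, count_single s 'D' "D" rfl,
    count_single s 'E' "E" rfl]
  omega
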